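-- pv_equiv track=rewrite | github.com/pentakll4002/health_care_clinics | test.py | products_without_any_numeric_price
-- ===== SOURCE A (Python) =====
-- MIN_PRICE_VND = 100
--
-- def _row_has_numeric_price(row: dict) -> bool:
--     pr = row.get("price")
--     if pr is None or str(pr).strip() in ("", "N/A"):
--         return False
--     try:
--         return int(str(pr).replace(",", "").replace(" ", "").strip()) >= MIN_PRICE_VND
--     except (TypeError, ValueError):
--         return False
--
-- def products_without_any_numeric_price(drugs):
--     """Các URL không có bất kỳ ĐVT nào có giá số (đúng nghĩa 'sản phẩm không giá')."""
--     by_url = {}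
--     for d in drugs:
--         url = d.get("url") or ""
--         if url not in by_url:
--             by_url[url] = {"name": d.get("name"), "has_numeric": False}
--         if _row_has_numeric_price(d):
--             by_url[url]["has_numeric"] = True
--     out = []
--     for url, info in by_url.items():
--         if not url or info["has_numeric"]:
--             continue
--         out.append({"name": info.get("name"), "url": url})
--     return out
-- ===== SOURCE B (Python) =====
-- MIN_PRICE_VND = 100
--
-- def _row_has_numeric_price(row: dict) -> bool:
--     pr = row.get("price")
--     if pr is None or str(pr).strip() in ("", "N/A"):
--         return False
--     try:
--         return int(str(pr).replace(",", "").replace(" ", "").strip()) >= MIN_PRICE_VND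
--     except (TypeError, ValueError):
--         return False
--
-- def products_without_any_numeric_price(drugs):
--     groups = {}
--     for d in drugs:
--         groups.setdefault(d.get("url") or "", []).append(d)
--     return [{"name": rows[0].get("name"), "url": url}
--             for url, rows in groups.items()
--             if url and not any(_row_has_numeric_price(r) for r in rows)]
-- ===== Notes on version B (the rewrite author's own statement) =====
-- stated objective: alternative
-- what changed: B groups rows into an ordered dict of per-URL row lists in one pass, then a second filter/map pass over the groups tests 'no row has a numeric price' and emits the first row's name, instead of A's single pass that maintains a (name, has_numeric) record per URL.
import Mathlib
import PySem

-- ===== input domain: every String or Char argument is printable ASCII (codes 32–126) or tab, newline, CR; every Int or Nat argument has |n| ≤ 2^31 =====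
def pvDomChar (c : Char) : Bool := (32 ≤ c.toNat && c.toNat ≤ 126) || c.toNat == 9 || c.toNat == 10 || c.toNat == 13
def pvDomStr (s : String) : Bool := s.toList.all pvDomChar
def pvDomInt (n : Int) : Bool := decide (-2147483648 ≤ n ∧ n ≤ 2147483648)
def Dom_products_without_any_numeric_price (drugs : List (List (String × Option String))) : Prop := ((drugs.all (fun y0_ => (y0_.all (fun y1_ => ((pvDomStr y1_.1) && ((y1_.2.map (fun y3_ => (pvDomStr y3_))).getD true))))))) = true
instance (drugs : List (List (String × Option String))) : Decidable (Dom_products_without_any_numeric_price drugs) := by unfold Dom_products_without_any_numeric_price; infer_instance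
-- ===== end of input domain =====

-- B groups the rows per URL in one pass and decides "no numeric price" per group in a second
-- pass (a different decomposition, same cost); return value proved equal to A's on all inputs.

-- shared helpers (ports of the module's `_row_has_numeric_price` and of `d.get(k)` / `d.get("url") or ""`)

-- Python row.get(k): first matching key, default None (a stored None and a missing key both give None)
def pvRowGet (row : List (String × Option String)) (k : String) : Option String :=
  (row.find? (fun p => p.1 == k)).bind (·.2)

def MIN_PRICE_VND : Int := 100

-- port of `_row_has_numeric_price` (pr is always None or a str here, so str(pr) = pr and no TypeError)
def rowHasNumericPrice (row : List (String × Option String)) : Bool :=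
  match pvRowGet row "price" with
  | none => false
  | some pr =>
    if PySem.Str.strip pr == "" || PySem.Str.strip pr == "N/A" then false
    else
      match PySem.Int.ofStr? (PySem.Str.strip
              (PySem.Str.replace (PySem.Str.replace pr "," "") " " "")) with
      | some n => decide (MIN_PRICE_VND ≤ n)
      | none => false

-- `d.get("url") or ""`: the only falsy candidates of type Optional[str] are None and ""
def pvUrlOf (row : List (String × Option String)) : String := (pvRowGet row "url").getD ""

-- ===== PORT A =====
-- one iteration of A's first loop over `drugs`
def pvStepA (by_url : PySem.Dict String (Option String × Bool))
    (d : List (String × Option String)) : PySem.Dict String (Option String × Bool) :=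
  let url := pvUrlOf d
  let by_url := if by_url.contains url then by_url
                else by_url.insert url (pvRowGet d "name", false)
  if rowHasNumericPrice d then
    -- by_url[url]["has_numeric"] = True
    by_url.insert url ((by_url.getD url (none, false)).1, true)
  else by_url

def products_without_any_numeric_price (drugs : List (List (String × Option String))) : List (List (String × Option String)) :=
  let by_url := drugs.foldl pvStepA PySem.Dict.empty
  by_url.items.foldl (fun out p =>
    if p.1 == "" || p.2.2 then out
    else out ++ [[("name", p.2.1), ("url", some p.1)]]) []

-- ===== PORT B =====
-- one iteration of B's grouping loop: groups.setdefault(url, []).append(d)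
def pvStepB (g : PySem.Dict String (List (List (String × Option String))))
    (d : List (String × Option String)) : PySem.Dict String (List (List (String × Option String))) :=
  g.insert (pvUrlOf d) (g.getD (pvUrlOf d) [] ++ [d])

def products_without_any_numeric_price_alt (drugs : List (List (String × Option String))) : List (List (String × Option String)) :=
  let groups := drugs.foldl pvStepB PySem.Dict.empty
  (groups.items.filter (fun q => !(q.1 == "") && !(q.2.any rowHasNumericPrice))).map
    (fun q => [("name", pvRowGet (q.2.headD []) "name"), ("url", some q.1)])

-- ===== PRECONDITION & SPEC =====
def Spec_products_without_any_numeric_price (drugs : List (List (String × Option String))) (out : List (List (String × Option String))) : Prop := out = products_without_any_numeric_price_alt drugs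
instance (drugs : List (List (String × Option String))) (out : List (List (String × Option String))) : Decidable (Spec_products_without_any_numeric_price drugs out) := by unfold Spec_products_without_any_numeric_price; infer_instance

-- ===== CLAIM (what is proved, stated in full; the proofs are below) =====
def Claim_equal_products_without_any_numeric_price : Prop := ∀ (drugs : List (List (String × Option String))), Dom_products_without_any_numeric_price drugs → Spec_products_without_any_numeric_price drugs (products_without_any_numeric_price drugs)

-- ===== LEMMAS AND PROOFS =====

-- abstraction: A's per-URL record is B's group, summarised
def pvF (q : String × List (List (String × Option String))) : String × (Option String × Bool) :=
  (q.1, (pvRowGet (q.2.headD []) "name", q.2.any rowHasNumericPrice))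

lemma pv_loop (drugs : List (List (String × Option String)))
    (dA : PySem.Dict String (Option String × Bool))
    (dB : PySem.Dict String (List (List (String × Option String))))
    (h : dA.items = dB.items.map pvF) (hnd : dB.keys.Nodup)
    (hne : ∀ q ∈ dB.items, q.2 ≠ []) :
    (drugs.foldl pvStepA dA).items = (drugs.foldl pvStepB dB).items.map pvF := by
  induction drugs generalizing dA dB with
  | nil => simpa using h
  | cons d ds ih =>
    have keysEq : dA.keys = dB.keys := by
      simp only [PySem.Dict.keys, h, List.map_map]; rfl
    have containsEq : ∀ u, dA.contains u = dB.contains u := by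
      intro u
      rw [PySem.Dict.contains_eq_decide_mem_keys, PySem.Dict.contains_eq_decide_mem_keys, keysEq]
    have hndA : dA.keys.Nodup := keysEq ▸ hnd
    set u := pvUrlOf d with hu
    simp only [List.foldl_cons]
    by_cases hcB : dB.contains u = true
    · -- u already present: A keeps (name, flag) and may set the flag; B appends the row
      rcases hv : dB.get? u with _ | rows
      · rw [PySem.Dict.contains_eq_isSome_get?, hv] at hcB; simp at hcB
      have hmem : (u, rows) ∈ dB.items :=
        (PySem.Dict.get?_eq_some_iff_mem_items dB u rows hnd).1 hv
      have hgB : dB.getD u [] = rows := PySem.Dict.getD_of_get?_eq_some dB [] hv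
      have hrne : rows ≠ [] := hne _ hmem
      obtain ⟨r, rs, rfl⟩ := List.exists_cons_of_ne_nil hrne
      have hmemA : (u, (pvRowGet ((r :: rs).headD []) "name", (r :: rs).any rowHasNumericPrice)) ∈ dA.items := by
        rw [h]; exact List.mem_map_of_mem hmem
      have hgA : dA.getD u (none, false)
          = (pvRowGet ((r :: rs).headD []) "name", (r :: rs).any rowHasNumericPrice) :=
        PySem.Dict.getD_of_mem_items dA hmemA hndA _
      have hB' : (pvStepB dB d).items
          = dB.items.map (fun q => if q.1 == u then (u, (r :: rs) ++ [d]) else q) := by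
        simp only [pvStepB, ← hu, hgB]
        exact PySem.Dict.items_insert_of_contains dB _ hcB
      -- for q in dB.items with q.1 = u we have q = (u, r :: rs)
      have huniq : ∀ q ∈ dB.items, q.1 = u → q = (u, r :: rs) := by
        intro q hq hq1
        have : dB.get? q.1 = some q.2 :=
          (PySem.Dict.get?_eq_some_iff_mem_items dB q.1 q.2 hnd).2 (by simpa using hq)
        rw [hq1, hv] at this
        cases q; simp_all
      have hkeysB' : (pvStepB dB d).keys = dB.keys := by
        simp only [PySem.Dict.keys, hB', List.map_map]
        refine List.map_congr_left (fun q hq => ?_)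
        by_cases h1 : q.1 = u <;> simp [h1]
      have hndB' : (pvStepB dB d).keys.Nodup := by rw [hkeysB']; exact hnd
      have hneB' : ∀ q ∈ (pvStepB dB d).items, q.2 ≠ [] := by
        rw [hB']; intro q hq
        rcases List.mem_map.1 hq with ⟨q₀, hq₀, rfl⟩
        by_cases h1 : q₀.1 = u <;> simp [h1, hne _ hq₀]
      by_cases hnum : rowHasNumericPrice d
      · have hA' : pvStepA dA d = dA.insert u (pvRowGet ((r :: rs).headD []) "name", true) := by
          simp [pvStepA, ← hu, containsEq u, hcB, hnum, hgA]
        rw [hA']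
        refine ih _ _ ?_ hndB' hneB'
        rw [PySem.Dict.items_insert_of_contains dA _ (by rw [containsEq]; exact hcB),
          hB', h, List.map_map, List.map_map]
        refine List.map_congr_left (fun q hq => ?_)
        by_cases h1 : q.1 = u
        · have hq' := huniq q hq h1
          subst hq'
          simp [pvF, Function.comp, hnum]
        · simp [pvF, Function.comp, h1]
      · have hA' : pvStepA dA d = dA := by
          simp [pvStepA, ← hu, containsEq u, hcB, hnum]
        rw [hA']
        refine ih _ _ ?_ hndB' hneB'
        rw [hB', h, List.map_map]
        refine List.map_congr_left (fun q hq => ?_)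
        by_cases h1 : q.1 = u
        · have hq' := huniq q hq h1
          subst hq'
          simp [pvF, Function.comp, hnum]
        · simp [pvF, Function.comp, h1]
    · -- u is new: both sides append a fresh entry
      have hcB' : dB.contains u = false := by simpa using hcB
      have hcA : dA.contains u = false := by rw [containsEq]; exact hcB'
      have hgB : dB.getD u [] = [] := PySem.Dict.getD_of_not_contains dB [] hcB'
      have hB' : pvStepB dB d = dB.insert u [d] := by
        simp [pvStepB, ← hu, hgB]
      have hA' : pvStepA dA d = dA.insert u (pvRowGet d "name", rowHasNumericPrice d) := by
        by_cases hnum : rowHasNumericPrice d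
        · simp [pvStepA, ← hu, hcA, hnum, PySem.Dict.getD_insert_self,
            PySem.Dict.insert_insert_self]
        · simp [pvStepA, ← hu, hcA, hnum]
      rw [hA', hB']
      have hitemsB' : (dB.insert u [d]).items = dB.items ++ [(u, [d])] :=
        PySem.Dict.items_insert_of_not_contains dB _ hcB'
      refine ih _ _ ?_ ?_ ?_
      · rw [PySem.Dict.items_insert_of_not_contains dA _ hcA, hitemsB', h]
        simp [pvF]
      · have : (dB.insert u [d]).keys = dB.keys ++ [u] := by
          simp [PySem.Dict.keys, hitemsB']
        rw [this]
        have hnotmem : u ∉ dB.keys := by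
          rw [PySem.Dict.contains_eq_decide_mem_keys] at hcB'
          simpa using hcB'
        rw [List.nodup_append]
        refine ⟨hnd, List.nodup_singleton u, fun a ha b hb => ?_⟩
        simp only [List.mem_singleton] at hb
        subst hb
        exact fun h' => hnotmem (h' ▸ ha)
      · rw [hitemsB']
        intro q hq
        rcases List.mem_append.1 hq with hq | hq
        · exact hne _ hq
        · simp at hq; subst hq; simp

-- A's output loop, rewritten as filter-then-map
lemma pv_outA (l : List (String × (Option String × Bool))) :
    l.foldl (fun out p =>
      if p.1 == "" || p.2.2 then out
      else out ++ [[("name", p.2.1), ("url", some p.1)]]) []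
    = (l.filter (fun p => !(p.1 == "") && !p.2.2)).map
        (fun p => [(("name" : String), p.2.1), ("url", some p.1)]) := by
  have hfun : (fun (out : List (List (String × Option String))) (p : String × (Option String × Bool)) =>
      if p.1 == "" || p.2.2 then out else out ++ [[("name", p.2.1), ("url", some p.1)]])
      = (fun out p => if (!(p.1 == "") && !p.2.2) then
          out ++ [[("name", p.2.1), ("url", some p.1)]] else out) := by
    funext out p
    cases h1 : (p.1 == "") <;> cases h2 : p.2.2 <;> simp_all
  rw [hfun, PySem.List.foldl_append_if]
  simp

-- ===== VERDICT (by name: the statement is the Claim_ definition above) =====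
theorem products_without_any_numeric_price_spec : Claim_equal_products_without_any_numeric_price := by
  intro drugs _
  unfold Spec_products_without_any_numeric_price
  unfold products_without_any_numeric_price products_without_any_numeric_price_alt
  have hloop := pv_loop drugs PySem.Dict.empty PySem.Dict.empty (by rfl) (by simp [PySem.Dict.keys_empty]) (by intro q hq; simp [show (PySem.Dict.empty : PySem.Dict String (List (List (String × Option String)))).items = [] from rfl] at hq)
  simp only [hloop, pv_outA, List.filter_map, List.map_map]
  rfl
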